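-- pv_equiv track=rewrite | github.com/Khrrousheh/Heart-Disease-Risk-Assessment | main.py | _male_points_to_risk
-- ===== SOURCE A (Python) =====
-- def _male_points_to_risk(points):
--     """Convert male Framingham points to risk percentage"""
--     risk_map = [
--         (0, 1), (5, 2), (7, 3), (8, 4), (9, 5), (10, 6),
--         (11, 8), (12, 10), (13, 12), (14, 16), (15, 20),
--         (16, 25), (17, 30)
--     ]
--     for threshold, risk in risk_map:
--         if points < threshold:
--             return risk
--     return 30
-- ===== SOURCE B (Python) =====
-- _THRESHOLDS = [0, 5, 7, 8, 9, 10, 11, 12, 13, 14, 15, 16, 17]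
-- _RISKS = [1, 2, 3, 4, 5, 6, 8, 10, 12, 16, 20, 25, 30]
--
--
-- def _male_points_to_risk(points):
--     """Convert male Framingham points to risk percentage"""
--     # binary search (bisect_right) for the first threshold strictly above points
--     lo, hi = 0, len(_THRESHOLDS)
--     while lo < hi:
--         mid = (lo + hi) // 2
--         if points < _THRESHOLDS[mid]:
--             hi = mid
--         else:
--             lo = mid + 1
--     return _RISKS[lo] if lo < len(_RISKS) else 30
-- ===== Notes on version B (the rewrite author's own statement) =====
-- stated objective: alternative
-- what changed: Replaces the linear scan over (threshold, risk) pairs with a hand-rolled bisect_right binary search over a sorted threshold table, indexing a parallel risk table (sentinel 30 past the end).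
import Mathlib
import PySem

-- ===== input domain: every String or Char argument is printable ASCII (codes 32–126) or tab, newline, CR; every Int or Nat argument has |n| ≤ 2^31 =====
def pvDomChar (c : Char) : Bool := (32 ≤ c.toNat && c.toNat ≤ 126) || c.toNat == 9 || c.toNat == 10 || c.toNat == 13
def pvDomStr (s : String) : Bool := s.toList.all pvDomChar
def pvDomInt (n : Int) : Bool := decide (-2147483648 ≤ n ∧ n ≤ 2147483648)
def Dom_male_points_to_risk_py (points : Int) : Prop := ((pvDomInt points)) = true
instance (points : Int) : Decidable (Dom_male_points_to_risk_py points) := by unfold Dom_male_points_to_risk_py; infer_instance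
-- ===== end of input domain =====

-- B replaces A's linear scan of the (threshold, risk) table by a bisect_right
-- binary search over a sorted threshold list with a parallel risk list (alternative; not faster on a 13-entry table).

-- ===== PORT A =====
-- the for-loop over risk_map: first pair with points < threshold wins, else 30
def maleRiskLoop (points : Int) : List (Int × Int) → Int
  | [] => 30
  | (threshold, risk) :: rest =>
      if points < threshold then risk else maleRiskLoop points rest

def male_points_to_risk_py (points : Int) : Int :=
  maleRiskLoop points
    [(0, 1), (5, 2), (7, 3), (8, 4), (9, 5), (10, 6),
     (11, 8), (12, 10), (13, 12), (14, 16), (15, 20),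
     (16, 25), (17, 30)]

-- ===== PORT B =====
def bThresholds : List Int := [0, 5, 7, 8, 9, 10, 11, 12, 13, 14, 15, 16, 17]
def bRisks : List Int := [1, 2, 3, 4, 5, 6, 8, 10, 12, 16, 20, 25, 30]

-- the while-loop of Source B: bisect_right binary search, state (lo, hi)
def bisectLoop (points : Int) (lo hi : Nat) : Nat :=
  if lo < hi then
    let mid := (lo + hi) / 2
    if points < bThresholds.getD mid 0 then
      bisectLoop points lo mid
    else
      bisectLoop points (mid + 1) hi
  else lo
termination_by hi - lo
decreasing_by all_goals omega

def male_points_to_risk_py_alt (points : Int) : Int :=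
  let lo := bisectLoop points 0 bThresholds.length
  if lo < bRisks.length then bRisks.getD lo 0 else 30

-- ===== PRECONDITION & SPEC =====
def Spec_male_points_to_risk_py (points : Int) (out : Int) : Prop := out = male_points_to_risk_py_alt points
instance (points : Int) (out : Int) : Decidable (Spec_male_points_to_risk_py points out) := by unfold Spec_male_points_to_risk_py; infer_instance

-- ===== CLAIM (what is proved, stated in full; the proofs are below) =====
def Claim_equal_male_points_to_risk_py : Prop := ∀ (points : Int), Dom_male_points_to_risk_py points → Spec_male_points_to_risk_py points (male_points_to_risk_py points)

-- ===== LEMMAS AND PROOFS =====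

-- ===== VERDICT (by name: the statement is the Claim_ definition above) =====
set_option maxHeartbeats 2000000 in
theorem male_points_to_risk_py_spec : Claim_equal_male_points_to_risk_py := by
  intro points _
  unfold Spec_male_points_to_risk_py
  simp only [male_points_to_risk_py, male_points_to_risk_py_alt, maleRiskLoop]
  simp [bisectLoop, bThresholds, bRisks, List.getD]
  split_ifs <;> first | rfl | omega
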